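-- pv_equiv track=rewrite | github.com/junjongwook/programmers | Skill Check/Level3/s12987.py | solution
-- ===== SOURCE A (Python) =====
-- from bisect import bisect_right
--
-- def solution(A, B):
--     answer = 0
--     A.sort()
--     B.sort()
--     N = len(A)
--     for i in range(N):
--         a = A[i]
--         l = bisect_right(B, a)
--         if l == len(B):
--             b = B[0]
--         else:
--             b = B[l]
--         if a < b:
--             answer = answer + 1
--         B.remove(b)
--
--     return answer
-- ===== SOURCE B (Python) =====
-- def solution(A, B):
--     # Two-pointer greedy over both sorted lists: O(N log N) instead of A's
--     # O(N^2) (bisect + list.remove per element). Sorts A and B in place,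
--     # matching A's observable mutation of its arguments.
--     A.sort()
--     B.sort()
--     count = 0
--     j = 0
--     n = len(B)
--     for a in A:
--         while j < n and B[j] <= a:
--             j += 1
--         if j < n:
--             count += 1
--             j += 1
--     return count
-- ===== Notes on version B (the rewrite author's own statement) =====
-- stated objective: faster
-- what changed: Replaces A's per-element bisect_right + B.remove loop (a linear removal per element of A) with a single two-pointer pass over the two sorted lists.
import Mathlib
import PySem

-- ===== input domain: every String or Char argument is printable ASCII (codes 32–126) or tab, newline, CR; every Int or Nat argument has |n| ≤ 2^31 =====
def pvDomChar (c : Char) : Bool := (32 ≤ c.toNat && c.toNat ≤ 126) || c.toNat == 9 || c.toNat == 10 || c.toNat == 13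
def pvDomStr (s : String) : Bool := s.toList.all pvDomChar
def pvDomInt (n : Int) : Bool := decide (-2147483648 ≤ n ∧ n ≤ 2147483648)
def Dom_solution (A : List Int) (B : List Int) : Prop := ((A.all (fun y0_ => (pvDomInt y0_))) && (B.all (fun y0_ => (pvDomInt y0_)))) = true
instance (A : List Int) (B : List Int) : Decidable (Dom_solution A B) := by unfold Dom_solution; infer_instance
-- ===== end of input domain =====

-- B replaces A's per-element bisect + list.remove loop with a single two-pointer
-- pass over both sorted lists (objective: faster). Both Pythons sort A and B in
-- place; the equivalence proved here is about the return value.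


-- ===== PORT A =====
-- the 'for i in range(N)' loop with a = A[i] (A unchanged inside the loop), as
-- structural recursion over the sorted A; state = (current B, answer).
-- B[0]/B[l]/B.remove(b) raise only when B is empty, which Pre_ excludes; the
-- defaults (getD 0, .getD bs) are never reached under Pre_.
def solutionLoop : List Int → List Int → Int → Int
  | [], _, answer => answer
  | a :: rest, bs, answer =>
    let l := PySem.List.bisectRight bs a
    let b := if l = bs.length then bs.getD 0 0 else bs.getD l 0
    let answer' := if a < b then answer + 1 else answer
    solutionLoop rest ((PySem.List.remove? bs b).getD bs) answer'

def solution (A : List Int) (B : List Int) : Int :=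
  solutionLoop (PySem.List.sorted A (fun x => x)) (PySem.List.sorted B (fun x => x)) 0

-- ===== PORT B =====
-- the inner 'while j < n and B[j] <= a: j += 1' advances j past the ≤ a prefix
-- of the remaining sorted B: recursion carries that suffix ( = B2[j:] ).
def altLoop : List Int → List Int → Int
  | [], _ => 0
  | a :: rest, bs =>
    match bs.dropWhile (fun b => decide (b ≤ a)) with
    | [] => altLoop rest []
    | _ :: bs' => 1 + altLoop rest bs'

def solution_alt (A : List Int) (B : List Int) : Int :=
  altLoop (PySem.List.sorted A (fun x => x)) (PySem.List.sorted B (fun x => x))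

-- ===== PRECONDITION & SPEC =====
-- A raises IndexError once B has been emptied while elements of A remain,
-- i.e. exactly when len(A) > len(B); Pre_ excludes that.
def Pre_solution (A : List Int) (B : List Int) : Prop := A.length ≤ B.length
instance (A : List Int) (B : List Int) : Decidable (Pre_solution A B) := by unfold Pre_solution; infer_instance
def pvWitness_solution : List Int × List Int := ([3, 1, 2], [2, 2, 5])

def Spec_solution (A : List Int) (B : List Int) (out : Int) : Prop := out = solution_alt A B
instance (A : List Int) (B : List Int) (out : Int) : Decidable (Spec_solution A B out) := by unfold Spec_solution; infer_instance

-- ===== CLAIM (what is proved, stated in full; the proofs are below) =====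
def Claim_equal_solution : Prop := ∀ (A : List Int) (B : List Int), Dom_solution A B → Pre_solution A B → Spec_solution A B (solution A B)

-- ===== LEMMAS AND PROOFS =====

theorem altLoop_nil (A : List Int) : altLoop A [] = 0 := by
  induction A with
  | nil => rfl
  | cons a rest ih => simp [altLoop, ih]

-- bisectRight on the sorted current B: with a prefix P all ≤ a and the rest
-- (if any) starting above a, the insertion point is P.length.
theorem bisect_eq (P Q : List Int) (a : Int)
    (hs : (P ++ Q).Pairwise (· ≤ ·))
    (hP : ∀ x ∈ P, x ≤ a)
    (hQ : ∀ b ∈ Q.head?, a < b) :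
    PySem.List.bisectRight (P ++ Q) a = P.length := by
  obtain ⟨hle, h1, h2⟩ := PySem.List.bisectRight_spec (P ++ Q) a hs
  set l := PySem.List.bisectRight (P ++ Q) a with hl
  simp [List.length_append] at hle
  rcases lt_trichotomy l P.length with h | h | h
  · have hlt : l < (P ++ Q).length := by simp; omega
    have := h2 l hlt (le_refl l)
    rw [List.getElem_append_left h] at this
    exact absurd this (not_lt.2 (hP _ (List.getElem_mem _)))
  · exact h
  · -- P.length < l ≤ len, so Q ≠ []
    cases Q with
    | nil => simp at hle; omega
    | cons c cs =>
      have hlt : P.length < (P ++ c :: cs).length := by simp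
      have := h1 P.length hlt h
      rw [List.getElem_append_right (le_refl P.length)] at this
      simp at this
      have := hQ c (by simp)
      omega

-- key invariant: B's current list is (pre ++ C) where pre collects elements already
-- ≤ every remaining a; A's loop on it computes ans + (two-pointer count on C).
theorem key (A : List Int) : ∀ (pre C : List Int) (ans : Int),
    A.Pairwise (· ≤ ·) → (pre ++ C).Pairwise (· ≤ ·) →
    (∀ x ∈ pre, ∀ a ∈ A, x ≤ a) →
    A.length ≤ pre.length + C.length →
    solutionLoop A (pre ++ C) ans = ans + altLoop A C := by
  induction A with
  | nil => intro pre C ans _ _ _ _; simp [solutionLoop, altLoop]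
  | cons a rest ih =>
    intro pre C ans hA hB hpre hlen
    have hC : C.takeWhile (fun b => decide (b ≤ a)) ++ C.dropWhile (fun b => decide (b ≤ a)) = C :=
      List.takeWhile_append_dropWhile
    have hpa : ∀ x ∈ pre, x ≤ a := fun x hx => hpre x hx a (List.mem_cons_self ..)
    have hcle : ∀ x ∈ C.takeWhile (fun b => decide (b ≤ a)), x ≤ a := by
      intro x hx; have := List.mem_takeWhile_imp hx; simpa using this
    have harest : ∀ a' ∈ rest, a ≤ a' := fun a' h => List.rel_of_pairwise_cons hA h
    cases hd : C.dropWhile (fun b => decide (b ≤ a)) with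
    | nil =>
      -- all of C ≤ a; bisect hits len(B); b = head; no count; remove head
      have hCeq : C.takeWhile (fun b => decide (b ≤ a)) = C := by rw [hd] at hC; simpa using hC
      have hcall : ∀ x ∈ C, x ≤ a := by rw [← hCeq]; exact hcle
      have hball : ∀ x ∈ pre ++ C, x ≤ a := by
        intro x hx; rcases List.mem_append.1 hx with h | h
        · exact hpa x h
        · exact hcall x h
      have hbis : PySem.List.bisectRight (pre ++ C) a = (pre ++ C).length := by
        have := bisect_eq (pre ++ C) [] a (by simpa using hB) hball (by simp)
        simpa using this
      cases hpc : pre ++ C with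
      | nil =>
        exfalso
        have h0 : pre.length + C.length = 0 := by
          have := congrArg List.length hpc; simpa using this
        simp at hlen; omega
      | cons h t =>
        have hb0 : (pre ++ C).getD 0 0 = h := by rw [hpc]; rfl
        have hha : h ≤ a := hball h (by rw [hpc]; exact List.mem_cons_self ..)
        have hrem : (PySem.List.remove? (pre ++ C) h).getD (pre ++ C) = t := by
          rw [hpc, PySem.List.remove?_cons_self]; rfl
        rw [hpc] at hbis hrem
        simp only [solutionLoop]
        rw [hbis, if_pos rfl]
        have hb0' : (h :: t).getD 0 0 = h := rfl
        rw [hb0', if_neg (by omega), hrem]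
        have ht : solutionLoop rest (t ++ []) ans = ans + altLoop rest [] := by
          apply ih
          · exact hA.sublist (List.sublist_cons_self a rest)
          · have : (h :: t).Pairwise (· ≤ ·) := by rw [← hpc]; exact hB
            simpa using this.sublist (List.sublist_cons_self h t)
          · intro x hx a' ha'
            have hxa : x ≤ a := hball x (by rw [hpc]; exact List.mem_cons_of_mem _ hx)
            exact le_trans hxa (harest a' ha')
          · have hlc : pre.length + C.length = t.length + 1 := by
              have := congrArg List.length hpc; simpa using this
            have hlen' : rest.length + 1 ≤ pre.length + C.length := by simpa using hlen
            simp; omega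
        rw [List.append_nil] at ht
        rw [ht]
        have : altLoop (a :: rest) C = 0 := by
          simp only [altLoop, hd, altLoop_nil]
        rw [this, altLoop_nil]
    | cons b bs' =>
      -- b is the first element > a: count 1, remove b
      have hab : a < b := by
        have := List.head?_dropWhile_not (fun b => decide (b ≤ a)) C
        rw [hd] at this; simp at this; simpa using this
      set P := pre ++ C.takeWhile (fun b => decide (b ≤ a)) with hP
      have hBeq : pre ++ C = P ++ (b :: bs') := by
        rw [hP, List.append_assoc]
        congr 1
        rw [← hd]
        exact hC.symm
      have hPall : ∀ x ∈ P, x ≤ a := by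
        intro x hx; rcases List.mem_append.1 hx with h | h
        · exact hpa x h
        · exact hcle x h
      have hbis : PySem.List.bisectRight (pre ++ C) a = P.length := by
        rw [hBeq]; exact bisect_eq P (b :: bs') a (by rw [← hBeq]; exact hB) hPall (by simp [hab])
      have hlenlt : P.length < (pre ++ C).length := by
        have := congrArg List.length hBeq; simp at this; simp; omega
      have hgd : (pre ++ C).getD P.length 0 = b := by
        rw [hBeq, List.getD_eq_getElem?_getD, List.getElem?_append_right (le_refl P.length)]
        simp
      have hbnotP : b ∉ P := fun hmem => absurd (hPall b hmem) (by omega)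
      have hbmem : b ∈ pre ++ C := by rw [hBeq]; exact List.mem_append.2 (Or.inr (List.mem_cons_self ..))
      have hrem : (PySem.List.remove? (pre ++ C) b).getD (pre ++ C) = P ++ bs' := by
        rw [PySem.List.remove?_eq_some_erase _ _ hbmem]
        simp [hBeq, List.erase_append_right _ hbnotP]
      simp only [solutionLoop, hbis, hgd]
      rw [if_neg (by simp at hlenlt ⊢; omega), if_pos hab, hrem]
      have ht : solutionLoop rest (P ++ bs') (ans + 1) = (ans + 1) + altLoop rest bs' := by
        apply ih
        · exact hA.sublist (List.sublist_cons_self a rest)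
        · have : (P ++ b :: bs').Pairwise (· ≤ ·) := by rw [← hBeq]; exact hB
          exact this.sublist ((List.sublist_cons_self b bs').append_left P)
        · intro x hx a' ha'
          exact le_trans (hPall x hx) (harest a' ha')
        · have h1 := congrArg List.length hBeq; simp at h1; simp at hlen ⊢; omega
      rw [ht, altLoop, hd]
      ring


-- ===== VERDICT (by name: the statement is the Claim_ definition above) =====
theorem solution_spec : Claim_equal_solution := by
  intro A B _ hpre
  unfold Spec_solution solution solution_alt
  have h := key (PySem.List.sorted A (fun x => x)) [] (PySem.List.sorted B (fun x => x)) 0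
    (PySem.List.sorted_pairwise A _) (by simpa using PySem.List.sorted_pairwise B (fun x => x))
    (by simp)
    (by simp [PySem.List.length_sorted]; exact hpre)
  simpa using h
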